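-- pv_equiv track=rewrite | github.com/multitel-ai/nsw-da-medical-image | nsw_da_medical_image/classifier/viterbi.py | make_agregated_pred_sequence
-- ===== SOURCE A (Python) =====
-- def make_agregated_pred_sequence(predictions):
--     agr_prediction_sequence = [predictions[0]]
--     transition_inds = [0]
--     for i in range(1,len(predictions)):
--         if predictions[i] != predictions[i-1]:
--             agr_prediction_sequence.append(predictions[i])
--             transition_inds.append(i)
--
--     transition_inds.append(len(predictions))
--
--     return agr_prediction_sequence,transition_inds
-- ===== SOURCE B (Python) =====
-- def make_agregated_pred_sequence(predictions):
--     n = len(predictions)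
--     keys = []
--     lengths = []
--     i = 0
--     while i < n:
--         j = i + 1
--         while j < n and predictions[j] == predictions[i]:
--             j += 1
--         keys.append(predictions[i])
--         lengths.append(j - i)
--         i = j
--     transition_inds = [0]
--     for length in lengths:
--         transition_inds.append(transition_inds[-1] + length)
--     return keys, transition_inds
-- ===== Notes on version B (the rewrite author's own statement) =====
-- stated objective: alternative
-- what changed: A walks indices 1..n-1 comparing adjacent elements; B instead splits the list into consecutive-equal runs with a two-level scan, emits each run's key once, and rebuilds transition_inds as prefix sums of the run lengths.
-- crash fix: On the empty list A raises IndexError (it reads predictions[0]); B naturally returns ([], [0]). — e.g. on make_agregated_pred_sequence([]): A raises IndexError, B returns ([], [0])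
import Mathlib
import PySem

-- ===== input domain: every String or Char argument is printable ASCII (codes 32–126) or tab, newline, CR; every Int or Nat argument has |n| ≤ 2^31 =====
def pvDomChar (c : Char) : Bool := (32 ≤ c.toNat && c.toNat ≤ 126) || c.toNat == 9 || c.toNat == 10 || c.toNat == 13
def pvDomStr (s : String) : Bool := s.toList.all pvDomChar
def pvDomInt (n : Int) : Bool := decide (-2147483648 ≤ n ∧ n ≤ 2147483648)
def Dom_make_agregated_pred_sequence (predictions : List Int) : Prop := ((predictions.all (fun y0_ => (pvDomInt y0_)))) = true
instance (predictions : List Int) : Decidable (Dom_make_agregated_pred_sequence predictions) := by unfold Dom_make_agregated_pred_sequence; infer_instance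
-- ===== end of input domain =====

-- B replaces A's adjacent-comparison index loop by a run decomposition plus prefix sums of run lengths (objective: alternative).

-- ===== PORT A =====
-- Literal port of A: seed the state with predictions[0] and [0], loop i over range(1, len), append on change, then append len.
def make_agregated_pred_sequence (predictions : List Int) : List Int × List Int :=
  let st := (PySem.List.pyRange 1 (predictions.length : Int) 1).foldl
    (fun (st : List Int × List Int) i =>
      if PySem.List.pyGetD predictions i 0 ≠ PySem.List.pyGetD predictions (i - 1) 0 then
        (st.1 ++ [PySem.List.pyGetD predictions i 0], st.2 ++ [i])
      else st)
    ([(PySem.List.pyGet? predictions 0).getD 0], [0])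
  (st.1, st.2 ++ [(predictions.length : Int)])

-- ===== PORT B =====
-- B's two-level while scan: split into consecutive-equal runs, recording (key, length) per run.
def pvRunsAux (x c : Int) : List Int → List (Int × Int)
  | [] => [(x, c)]
  | y :: ys => if y == x then pvRunsAux x (c + 1) ys else (x, c) :: pvRunsAux y 1 ys

def pvRuns : List Int → List (Int × Int)
  | [] => []
  | x :: xs => pvRunsAux x 1 xs

def make_agregated_pred_sequence_alt (predictions : List Int) : List Int × List Int :=
  let rs := pvRuns predictions
  let inds := rs.foldl (fun acc r => acc ++ [acc.getLastD 0 + r.2]) [0]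
  (rs.map Prod.fst, inds)

-- ===== PRECONDITION & SPEC =====
-- A reads predictions[0] unconditionally, so it raises IndexError on the empty list; Pre_ excludes only that.
def Pre_make_agregated_pred_sequence (predictions : List Int) : Prop := predictions ≠ []
instance (predictions : List Int) : Decidable (Pre_make_agregated_pred_sequence predictions) := by unfold Pre_make_agregated_pred_sequence; infer_instance
def pvWitness_make_agregated_pred_sequence : List Int := [1, 1, 2]

-- On the empty list A raises IndexError (it reads predictions[0]); B naturally returns ([], [0]).
def Raises_make_agregated_pred_sequence (predictions : List Int) : Prop := predictions = []
instance (predictions : List Int) : Decidable (Raises_make_agregated_pred_sequence predictions) := by unfold Raises_make_agregated_pred_sequence; infer_instance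
def pvRaiseWitness_make_agregated_pred_sequence : List Int := []
def pvRaiseWitnessOut_make_agregated_pred_sequence : List Int × List Int := ([], [0])

def Spec_make_agregated_pred_sequence (predictions : List Int) (out : List Int × List Int) : Prop := out = make_agregated_pred_sequence_alt predictions
instance (predictions : List Int) (out : List Int × List Int) : Decidable (Spec_make_agregated_pred_sequence predictions out) := by unfold Spec_make_agregated_pred_sequence; infer_instance

-- ===== CLAIM (what is proved, stated in full; the proofs are below) =====
def Claim_equal_make_agregated_pred_sequence : Prop := ∀ (predictions : List Int), Dom_make_agregated_pred_sequence predictions → Pre_make_agregated_pred_sequence predictions → Spec_make_agregated_pred_sequence predictions (make_agregated_pred_sequence predictions)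
def Claim_raises_make_agregated_pred_sequence : Prop := (∀ (predictions : List Int), Dom_make_agregated_pred_sequence predictions → Raises_make_agregated_pred_sequence predictions → ¬ Pre_make_agregated_pred_sequence predictions) ∧ (Dom_make_agregated_pred_sequence (pvRaiseWitness_make_agregated_pred_sequence) ∧ Raises_make_agregated_pred_sequence (pvRaiseWitness_make_agregated_pred_sequence) ∧ make_agregated_pred_sequence_alt (pvRaiseWitness_make_agregated_pred_sequence) = pvRaiseWitnessOut_make_agregated_pred_sequence)

-- ===== LEMMAS AND PROOFS =====

-- Reference recursion: given the previous value and current index, the (keys, transition indices) A's loop appends.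
def specAgr : Int → Int → List Int → List Int × List Int
  | _, _, [] => ([], [])
  | prev, i, y :: ys =>
    if y ≠ prev then
      let r := specAgr y (i + 1) ys
      (y :: r.1, i :: r.2)
    else specAgr prev (i + 1) ys

-- Run starts from a starting index.
def runStarts : List (Int × Int) → Int → List Int
  | [], _ => []
  | r :: rs, j => j :: runStarts rs (j + r.2)

-- Prefix sums of run lengths from a running total.
def sums : List (Int × Int) → Int → List Int
  | [], _ => []
  | r :: rs, s => (s + r.2) :: sums rs (s + r.2)

theorem aux_A (ps : List Int) : ∀ (m k : Nat), ps.length - k = m → 1 ≤ k → k ≤ ps.length →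
    ∀ (agr inds : List Int),
    (PySem.List.pyRange (k : Int) (ps.length : Int) 1).foldl
      (fun (st : List Int × List Int) i =>
        if PySem.List.pyGetD ps i 0 ≠ PySem.List.pyGetD ps (i - 1) 0 then
          (st.1 ++ [PySem.List.pyGetD ps i 0], st.2 ++ [i])
        else st) (agr, inds)
      = (agr ++ (specAgr (ps.getD (k - 1) 0) (k : Int) (ps.drop k)).1,
         inds ++ (specAgr (ps.getD (k - 1) 0) (k : Int) (ps.drop k)).2) := by
  intro m
  induction m with
  | zero =>
    intro k hm _ hk2 agr inds
    have hk : k = ps.length := by omega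
    subst hk
    rw [PySem.List.pyRange_one_eq_nil le_rfl]
    simp [List.drop_length, specAgr]
  | succ m ih =>
    intro k hm hk1 hk2 agr inds
    have hklt : k < ps.length := by omega
    rw [PySem.List.pyRange_one_cons (by exact_mod_cast hklt)]
    have hcast1 : (k : Int) - 1 = ((k - 1 : Nat) : Int) := by omega
    have hget : PySem.List.pyGetD ps (k : Int) 0 = ps.getD k 0 := PySem.List.pyGetD_natCast ps k 0
    have hgetp : PySem.List.pyGetD ps ((k : Int) - 1) 0 = ps.getD (k - 1) 0 := by
      rw [hcast1]; exact PySem.List.pyGetD_natCast ps (k - 1) 0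
    have hdrop : ps.drop k = ps.getD k 0 :: ps.drop (k + 1) := by
      rw [List.drop_eq_getElem_cons hklt, List.getD_eq_getElem ps 0 hklt]
    have hcast2 : ((k + 1 : Nat) : Int) = (k : Int) + 1 := by push_cast; ring
    have hprev : ps.getD ((k + 1) - 1) 0 = ps.getD k 0 := by norm_num
    simp only [List.foldl_cons, hget, hgetp, hdrop, specAgr]
    by_cases hne : ps.getD k 0 ≠ ps.getD (k - 1) 0
    · rw [if_pos hne, if_pos hne]
      have := ih (k + 1) (by omega) (by omega) (by omega) (agr ++ [ps.getD k 0]) (inds ++ [(k : Int)])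
      rw [hcast2] at this
      rw [this, hprev]
      simp
    · rw [if_neg hne, if_neg hne]
      rw [ne_eq, not_not] at hne
      have := ih (k + 1) (by omega) (by omega) (by omega) agr inds
      rw [hcast2] at this
      rw [this, hprev, hne]

theorem pvRunsAux_eq : ∀ (ys : List Int) (x c : Int),
    pvRunsAux x c ys = (x, c + ((ys.takeWhile (· == x)).length : Int)) :: pvRuns (ys.dropWhile (· == x)) := by
  intro ys
  induction ys with
  | nil => intro x c; simp [pvRunsAux, pvRuns]
  | cons y ys ih =>
    intro x c
    by_cases h : y = x
    · subst h
      simp only [pvRunsAux, beq_self_eq_true, if_true, ih, List.takeWhile_cons,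
        List.dropWhile_cons, List.length_cons]
      congr 2
      push_cast; ring
    · simp [pvRunsAux, pvRuns, h]

theorem specAgr_runs : ∀ (rest : List Int) (prev i : Int),
    specAgr prev i rest
      = ((pvRuns (rest.dropWhile (· == prev))).map Prod.fst,
         runStarts (pvRuns (rest.dropWhile (· == prev))) (i + ((rest.takeWhile (· == prev)).length : Int))) := by
  intro rest
  induction rest with
  | nil => intro prev i; simp [specAgr, pvRuns, runStarts]
  | cons y ys ih =>
    intro prev i
    by_cases h : y = prev
    · subst h
      simp only [specAgr, ne_eq, not_true_eq_false, if_false, reduceIte, ih,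
        List.dropWhile_cons, List.takeWhile_cons, beq_self_eq_true, List.length_cons]
      congr 2
      push_cast; ring
    · simp only [specAgr, ne_eq, h, not_false_eq_true, if_true, reduceIte,
        List.dropWhile_cons, List.takeWhile_cons, beq_iff_eq, ih y (i + 1)]
      rw [show (pvRuns (y :: ys)) = pvRunsAux y 1 ys from rfl, pvRunsAux_eq]
      simp only [List.map_cons, runStarts, List.length_nil, Nat.cast_zero, add_zero]
      have harg : i + 1 + ((ys.takeWhile (· == y)).length : Int)
          = i + (1 + ((ys.takeWhile (· == y)).length : Int)) := by ring
      rw [harg]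

theorem foldl_sums : ∀ (rs : List (Int × Int)) (inds : List Int) (s : Int), inds.getLastD 0 = s →
    rs.foldl (fun acc r => acc ++ [acc.getLastD 0 + r.2]) inds = inds ++ sums rs s := by
  intro rs
  induction rs with
  | nil => intro inds s _; simp [sums]
  | cons r rs ih =>
    intro inds s hs
    simp only [List.foldl_cons, sums, hs]
    rw [ih (inds ++ [s + r.2]) (s + r.2) (by simp)]
    simp

theorem starts_sums : ∀ (rs : List (Int × Int)) (j : Int),
    j :: sums rs j = runStarts rs j ++ [j + (rs.map Prod.snd).sum] := by
  intro rs
  induction rs with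
  | nil => intro j; simp [sums, runStarts]
  | cons r rs ih =>
    intro j
    simp only [sums, runStarts, List.map_cons, List.sum_cons, List.cons_append]
    rw [← add_assoc, ← ih (j + r.2)]

theorem sum_pvRunsAux : ∀ (ys : List Int) (x c : Int),
    ((pvRunsAux x c ys).map Prod.snd).sum = c + (ys.length : Int) := by
  intro ys
  induction ys with
  | nil => intro x c; simp [pvRunsAux]
  | cons y ys ih =>
    intro x c
    by_cases h : y = x
    · subst h
      simp only [pvRunsAux, beq_self_eq_true, if_true, ih, List.length_cons]
      push_cast; ring
    · simp only [pvRunsAux, beq_iff_eq, h, if_false, List.map_cons, List.sum_cons, ih,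
        List.length_cons]
      push_cast; ring

theorem sum_pvRuns (l : List Int) : ((pvRuns l).map Prod.snd).sum = (l.length : Int) := by
  cases l with
  | nil => simp [pvRuns]
  | cons x xs => simp [pvRuns, sum_pvRunsAux]; ring

-- ===== VERDICT (by name: the statement is the Claim_ definition above) =====
theorem key_eq : ∀ (x : Int) (xs : List Int),
    make_agregated_pred_sequence (x :: xs) = make_agregated_pred_sequence_alt (x :: xs) := by
  intro x xs
  set ps : List Int := x :: xs with hps
  have hx0 : (PySem.List.pyGet? ps 0).getD 0 = x := by
    simp [hps, PySem.List.pyGet?, PySem.List.pyIdx?]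
  have hA := aux_A ps (ps.length - 1) 1 rfl le_rfl (by simp [hps]) [x] [0]
  have hS := specAgr_runs xs x 1
  have hgd : ps.getD (1 - 1) 0 = x := by simp [hps]
  have hd1 : ps.drop 1 = xs := by simp [hps]
  set t : Int := ((xs.takeWhile (· == x)).length : Int) with ht
  set xs' : List Int := xs.dropWhile (· == x) with hxs'
  have hrs : pvRuns ps = (x, 1 + t) :: pvRuns xs' := by
    rw [hps]
    exact pvRunsAux_eq xs x 1
  have hsum : ((pvRuns xs').map Prod.snd).sum = (xs'.length : Int) := sum_pvRuns xs'
  have hlen : (ps.length : Int) = 1 + t + (xs'.length : Int) := by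
    have := congrArg List.length (List.takeWhile_append_dropWhile (p := (· == x)) (l := xs))
    simp only [List.length_append] at this
    simp [hps, ht, hxs', ← this]
    ring
  have hB : make_agregated_pred_sequence_alt ps
      = ((pvRuns ps).map Prod.fst, (pvRuns ps).foldl (fun acc r => acc ++ [acc.getLastD 0 + r.2]) [0]) := rfl
  rw [hB, foldl_sums (pvRuns ps) [0] 0 (by simp), hrs]
  have hA2 : make_agregated_pred_sequence ps =
      (((PySem.List.pyRange 1 (ps.length : Int) 1).foldl
        (fun (st : List Int × List Int) i =>
          if PySem.List.pyGetD ps i 0 ≠ PySem.List.pyGetD ps (i - 1) 0 then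
            (st.1 ++ [PySem.List.pyGetD ps i 0], st.2 ++ [i])
          else st) ([(PySem.List.pyGet? ps 0).getD 0], [0])).1,
       ((PySem.List.pyRange 1 (ps.length : Int) 1).foldl
        (fun (st : List Int × List Int) i =>
          if PySem.List.pyGetD ps i 0 ≠ PySem.List.pyGetD ps (i - 1) 0 then
            (st.1 ++ [PySem.List.pyGetD ps i 0], st.2 ++ [i])
          else st) ([(PySem.List.pyGet? ps 0).getD 0], [0])).2 ++ [(ps.length : Int)]) := rfl
  simp only [Nat.cast_one] at hA
  rw [hA2, hx0, hA, hgd, hd1, hS]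
  simp only [List.map_cons, sums, List.cons_append, Prod.mk.injEq]
  refine ⟨rfl, ?_⟩
  have hstart := starts_sums (pvRuns xs') (1 + t)
  rw [hsum] at hstart
  simp only [List.nil_append, zero_add]
  rw [hstart, hlen]

theorem make_agregated_pred_sequence_raises : Claim_raises_make_agregated_pred_sequence := by
  unfold Claim_raises_make_agregated_pred_sequence
  exact ⟨fun ps _ h => by simp [Raises_make_agregated_pred_sequence] at h; simp [Pre_make_agregated_pred_sequence, h], by decide⟩

theorem make_agregated_pred_sequence_spec : Claim_equal_make_agregated_pred_sequence := by
  intro ps _ hpre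
  unfold Spec_make_agregated_pred_sequence
  cases ps with
  | nil => exact absurd hpre (make_agregated_pred_sequence_raises.1 [] (by decide) rfl)
  | cons x xs => exact key_eq x xs
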